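-- pv_equiv track=rewrite | github.com/IFero04/Scraper-DGES | util.py | extract_escolas
-- ===== SOURCE A (Python) =====
-- def extract_escolas(text):
--     have_text = False
--     result = ''
--     for char in text:
--         if char.isdigit() and have_text:
--             break
--         if char.isalpha():
--             have_text = True
--         result += char
--     return result.strip()
-- ===== SOURCE B (Python) =====
-- def extract_escolas(text):
--     # Phase 1: locate the first alphabetic character.
--     a = None
--     for i, c in enumerate(text):
--         if c.isalpha():
--             a = i
--             break
--     if a is None:
--         return text.strip()
--     # Phase 2: locate the first digit after it; cut there.
--     for j in range(a + 1, len(text)):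
--         if text[j].isdigit():
--             return text[:j].strip()
--     return text.strip()
-- ===== Notes on version B (the rewrite author's own statement) =====
-- stated objective: simpler
-- what changed: Replaces the flag-carrying char-by-char accumulation loop by two locate phases (index of first letter, then of first digit after it) and a single slice.
import Mathlib
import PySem

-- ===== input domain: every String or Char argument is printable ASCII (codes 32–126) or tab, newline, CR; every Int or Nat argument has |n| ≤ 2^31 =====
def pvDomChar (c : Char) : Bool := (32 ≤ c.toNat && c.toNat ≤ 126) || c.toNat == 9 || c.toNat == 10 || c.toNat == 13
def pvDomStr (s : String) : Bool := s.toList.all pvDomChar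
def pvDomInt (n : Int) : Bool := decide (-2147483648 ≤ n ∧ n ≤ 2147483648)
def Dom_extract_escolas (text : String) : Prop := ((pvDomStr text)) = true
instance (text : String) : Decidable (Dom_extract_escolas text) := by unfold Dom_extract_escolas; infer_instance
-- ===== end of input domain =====

-- B replaces A's flag-carrying accumulation loop by two locate phases (first alpha index, then first digit
-- after it) plus a single slice; objective: simpler decomposition, same O(n) cost.

-- ===== PORT A =====
-- A's loop: state (have_text, result); breaks at a digit seen after a letter.
def extract_escolas_loop : List Char → Bool → List Char → List Char
  | [], _, result => result
  | c :: cs, have_text, result =>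
    if PySem.Chars.isdigit c && have_text then result
    else extract_escolas_loop cs (if PySem.Chars.isalpha c then true else have_text) (result ++ [c])

def extract_escolas (text : String) : String :=
  String.ofList (PySem.Chars.strip (extract_escolas_loop text.toList false []))

-- ===== PORT B =====
def extract_escolas_alt (text : String) : String :=
  match text.toList.findIdx? PySem.Chars.isalpha with
  | none => PySem.Str.strip text
  | some a =>
    match (text.toList.drop (a + 1)).findIdx? PySem.Chars.isdigit with
    | none => PySem.Str.strip text
    | some k => String.ofList (PySem.Chars.strip (text.toList.take (a + 1 + k)))

-- ===== PRECONDITION & SPEC =====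
def Spec_extract_escolas (text : String) (out : String) : Prop := out = extract_escolas_alt text
instance (text : String) (out : String) : Decidable (Spec_extract_escolas text out) := by unfold Spec_extract_escolas; infer_instance

-- ===== CLAIM (what is proved, stated in full; the proofs are below) =====
def Claim_equal_extract_escolas : Prop := ∀ (text : String), Dom_extract_escolas text → Spec_extract_escolas text (extract_escolas text)

-- ===== LEMMAS AND PROOFS =====

-- once have_text is set, the loop appends exactly the non-digit prefix of the rest
theorem loop_true (cs : List Char) : ∀ acc,
    extract_escolas_loop cs true acc = acc ++ cs.takeWhile (fun c => !PySem.Chars.isdigit c) := by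
  induction cs with
  | nil => intro acc; simp [extract_escolas_loop]
  | cons c cs ih =>
    intro acc
    by_cases h : PySem.Chars.isdigit c = true
    · simp [extract_escolas_loop, h]
    · simp only [Bool.not_eq_true] at h
      simp [extract_escolas_loop, h, ih]

-- before any letter, the loop copies everything until just after the first letter, then behaves as loop_true
theorem loop_false (cs : List Char) : ∀ acc,
    extract_escolas_loop cs false acc =
      match cs.findIdx? PySem.Chars.isalpha with
      | none => acc ++ cs
      | some a => acc ++ cs.take (a + 1) ++ (cs.drop (a + 1)).takeWhile (fun c => !PySem.Chars.isdigit c) := by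
  induction cs with
  | nil => intro acc; simp [extract_escolas_loop]
  | cons c cs ih =>
    intro acc
    by_cases h : PySem.Chars.isalpha c = true
    · simp [extract_escolas_loop, h, List.findIdx?_cons, loop_true]
    · simp only [Bool.not_eq_true] at h
      simp [extract_escolas_loop, h, ih, List.findIdx?_cons]
      cases hf : cs.findIdx? PySem.Chars.isalpha with
      | none => simp
      | some a => simp

theorem takeWhile_of_findIdx?_none {p : Char → Bool} {l : List Char} (h : l.findIdx? p = none) :
    l.takeWhile (fun c => !p c) = l := by
  simp [List.findIdx?_eq_none_iff] at h
  exact List.takeWhile_eq_self_iff.mpr (by simpa using h)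

theorem takeWhile_of_findIdx?_some {p : Char → Bool} : ∀ {l : List Char} {k : Nat},
    l.findIdx? p = some k → l.takeWhile (fun c => !p c) = l.take k := by
  intro l
  induction l with
  | nil => intro k h; rw [List.findIdx?_nil] at h; exact absurd h (by simp)
  | cons c cs ih =>
    intro k h
    rw [List.findIdx?_cons] at h
    by_cases hc : p c = true
    · simp [hc] at h
      simp [hc, ← h]
    · simp only [Bool.not_eq_true] at hc
      simp [hc] at h
      obtain ⟨m, hm, rfl⟩ := h
      simp [hc, ih hm]

-- ===== VERDICT (by name: the statement is the Claim_ definition above) =====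
theorem extract_escolas_spec : Claim_equal_extract_escolas := by
  intro text _
  unfold Spec_extract_escolas extract_escolas extract_escolas_alt
  rw [loop_false]
  cases ha : text.toList.findIdx? PySem.Chars.isalpha with
  | none =>
    simp only [List.nil_append]
    rw [← PySem.Str.toList_strip, String.ofList_toList]
  | some a =>
    simp only [List.nil_append]
    cases hd : (text.toList.drop (a + 1)).findIdx? PySem.Chars.isdigit with
    | none =>
      simp only [takeWhile_of_findIdx?_none hd, List.take_append_drop]
      rw [← PySem.Str.toList_strip, String.ofList_toList]
    | some k =>
      simp only [takeWhile_of_findIdx?_some hd, ← List.take_add]
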